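-- pv_equiv track=rewrite | github.com/chunkily/everybody_codes | quest18/part2.py | calculate_plant_energy
-- ===== SOURCE A (Python) =====
-- def calculate_plant_energy(plant_id, all_plants, all_branches, plant_energies):
--     if plant_id in plant_energies:
--         return plant_energies[plant_id]
--
--     branches = all_branches[plant_id]
--
--     plant_energy = 0
--     for other_plant_id, branch_thickness in branches:
--         other_plant_energy = calculate_plant_energy(
--             other_plant_id, all_plants, all_branches, plant_energies
--         )
--         plant_energy += other_plant_energy * branch_thickness
--
--     thickness = all_plants[plant_id]
--     if plant_energy < thickness:
--         plant_energy = 0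
--
--     plant_energies[plant_id] = plant_energy
--
--     return plant_energy
-- ===== SOURCE B (Python) =====
-- def calculate_plant_energy(plant_id, all_plants, all_branches, plant_energies):
--     # Bottom-up round-based relaxation instead of top-down memoized recursion:
--     # repeatedly sweep the branch table, filling in every plant whose children
--     # are already known, until plant_id is known.  (Return value only; like A,
--     # this populates the plant_energies cache in place.)
--     for _ in range(len(all_branches)):
--         if plant_id in plant_energies:
--             break
--         for node, branches in all_branches.items():
--             if node in plant_energies or node not in all_plants:
--                 continue
--             total = 0
--             ok = True
--             for other, thickness in branches:
--                 if other not in plant_energies: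
--                     ok = False
--                     break
--                 total += plant_energies[other] * thickness
--             if ok:
--                 plant_energies[node] = 0 if total < all_plants[node] else total
--     return plant_energies[plant_id]
-- ===== Notes on version B (the rewrite author's own statement) =====
-- stated objective: alternative
-- what changed: Top-down memoized recursion is replaced by a bottom-up round-based relaxation: B sweeps the branch table, each sweep filling in every plant whose children are already cached, until plant_id is cached; no recursion and no call stack.
import Mathlib
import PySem

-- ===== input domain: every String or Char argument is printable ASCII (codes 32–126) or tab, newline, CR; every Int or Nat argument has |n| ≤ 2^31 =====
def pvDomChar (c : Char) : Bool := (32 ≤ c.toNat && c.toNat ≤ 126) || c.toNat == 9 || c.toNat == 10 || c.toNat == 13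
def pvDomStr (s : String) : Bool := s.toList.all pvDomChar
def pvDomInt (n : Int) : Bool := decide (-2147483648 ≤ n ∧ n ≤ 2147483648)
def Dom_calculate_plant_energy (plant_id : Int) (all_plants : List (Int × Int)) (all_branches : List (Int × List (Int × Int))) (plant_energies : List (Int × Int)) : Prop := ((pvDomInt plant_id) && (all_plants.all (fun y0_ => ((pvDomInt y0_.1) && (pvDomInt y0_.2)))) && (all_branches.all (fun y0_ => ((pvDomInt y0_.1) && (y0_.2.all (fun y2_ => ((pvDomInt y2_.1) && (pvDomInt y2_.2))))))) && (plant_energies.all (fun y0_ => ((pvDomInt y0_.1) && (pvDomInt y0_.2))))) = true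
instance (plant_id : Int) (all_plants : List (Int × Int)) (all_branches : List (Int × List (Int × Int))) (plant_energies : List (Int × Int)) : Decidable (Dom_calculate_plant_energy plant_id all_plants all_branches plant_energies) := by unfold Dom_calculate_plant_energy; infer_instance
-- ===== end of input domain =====

-- B replaces A's top-down memoized recursion by a bottom-up round-based relaxation (no recursion,
-- no call stack); equivalence is about the RETURN value only — both Pythons also populate the
-- plant_energies dict in place, but B may cache resolvable plants that A's recursion never visits.

-- ===== PORT A =====
-- A's recursion, fuel-indexed (fuel = |all_branches| + 1 at the top level suffices on Pre_:
-- each nested call strictly decreases the rank of the plant in the pvReach fixpoint);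
-- `none` models a Python exception (KeyError / unbounded recursion).
mutual
def pvA_node (all_plants : List (Int × Int)) (all_branches : List (Int × List (Int × Int)))
    (fuel : Nat) (pid : Int) (cache : PySem.Dict Int Int) : Option (Int × PySem.Dict Int Int) :=
  match fuel with
  | 0 => none
  | fuel + 1 =>
    match cache.get? pid with
    | some v => some (v, cache)                     -- if plant_id in plant_energies: return it
    | none =>
      match (PySem.Dict.mk all_branches).get? pid with
      | none => none                                -- KeyError
      | some branches =>
        match pvA_fold all_plants all_branches fuel branches 0 cache with
        | none => none
        | some (pe, cache1) =>
          match (PySem.Dict.mk all_plants).get? pid with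
          | none => none                            -- KeyError
          | some thickness =>
            let pe1 := if pe < thickness then 0 else pe
            some (pe1, cache1.insert pid pe1)
  termination_by (fuel, 0)

def pvA_fold (all_plants : List (Int × Int)) (all_branches : List (Int × List (Int × Int)))
    (fuel : Nat) (branches : List (Int × Int)) (acc : Int) (cache : PySem.Dict Int Int) :
    Option (Int × PySem.Dict Int Int) :=
  match branches with
  | [] => some (acc, cache)
  | (o, th) :: rest =>
    match pvA_node all_plants all_branches fuel o cache with
    | none => none
    | some (v, cache1) => pvA_fold all_plants all_branches fuel rest (acc + v * th) cache1
  termination_by (fuel, branches.length + 1)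
end

def calculate_plant_energy (plant_id : Int) (all_plants : List (Int × Int)) (all_branches : List (Int × List (Int × Int))) (plant_energies : List (Int × Int)) : Int :=
  match pvA_node all_plants all_branches (all_branches.length + 1) plant_id (PySem.Dict.mk plant_energies) with
  | some (v, _) => v
  | none => 0

-- ===== PORT B =====
-- the inner `for other, thickness in branches` loop with the ok-flag/break: none = not ok
def pvB_sum (cache : PySem.Dict Int Int) (branches : List (Int × Int)) (acc : Int) : Option Int :=
  match branches with
  | [] => some acc
  | (o, th) :: rest =>
    match cache.get? o with
    | none => none
    | some v => pvB_sum cache rest (acc + v * th)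

-- one `for node, branches in all_branches.items()` body
def pvB_step (plants : PySem.Dict Int Int) (cache : PySem.Dict Int Int)
    (kb : Int × List (Int × Int)) : PySem.Dict Int Int :=
  if cache.contains kb.1 then cache
  else
    match plants.get? kb.1 with
    | none => cache
    | some t =>
      match pvB_sum cache kb.2 0 with
      | none => cache
      | some total => cache.insert kb.1 (if total < t then 0 else total)

def pvB_round (plants : PySem.Dict Int Int) (items : List (Int × List (Int × Int)))
    (cache : PySem.Dict Int Int) : PySem.Dict Int Int :=
  items.foldl (pvB_step plants) cache

-- `for _ in range(len(all_branches)): if plant_id in plant_energies: break; <round>`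
def pvB_loop (pid : Int) (plants : PySem.Dict Int Int) (items : List (Int × List (Int × Int))) :
    Nat → PySem.Dict Int Int → PySem.Dict Int Int
  | 0, cache => cache
  | n + 1, cache =>
    if cache.contains pid then cache
    else pvB_loop pid plants items n (pvB_round plants items cache)

def calculate_plant_energy_alt (plant_id : Int) (all_plants : List (Int × Int)) (all_branches : List (Int × List (Int × Int))) (plant_energies : List (Int × Int)) : Int :=
  match (pvB_loop plant_id (PySem.Dict.mk all_plants) all_branches all_branches.length
      (PySem.Dict.mk plant_energies)).get? plant_id with
  | some v => v
  | none => 0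

-- ===== PRECONDITION & SPEC =====
-- pvReach iterates "a plant is resolvable if it is cached, or has a branch entry and a thickness
-- entry and all its branch targets are resolvable" — the closed-form condition for A's recursion
-- to terminate with every dict lookup succeeding.
def pvReach (all_plants : List (Int × Int)) (all_branches : List (Int × List (Int × Int)))
    (S0 : List Int) : Nat → List Int
  | 0 => S0
  | n + 1 =>
    let T := pvReach all_plants all_branches S0 n
    T ++ all_branches.filterMap (fun kb =>
      if !T.contains kb.1 && all_plants.any (fun p => p.1 == kb.1) && kb.2.all (fun b => T.contains b.1)
      then some kb.1 else none)

-- Pre_ excludes (a) association lists with duplicate keys, which do not arise from Python dicts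
-- (a real dict keeps the LAST duplicate, the association-list model the first, so either reading
-- of such an input is defensible), and (b) inputs where plant_id is not resolvable, on which the
-- Python A raises (KeyError or unbounded recursion).
def Pre_calculate_plant_energy (plant_id : Int) (all_plants : List (Int × Int)) (all_branches : List (Int × List (Int × Int))) (plant_energies : List (Int × Int)) : Prop :=
  (all_plants.map Prod.fst).Nodup ∧ (all_branches.map Prod.fst).Nodup ∧
  (plant_energies.map Prod.fst).Nodup ∧
  plant_id ∈ pvReach all_plants all_branches (plant_energies.map Prod.fst) all_branches.length

instance (plant_id : Int) (all_plants : List (Int × Int)) (all_branches : List (Int × List (Int × Int))) (plant_energies : List (Int × Int)) : Decidable (Pre_calculate_plant_energy plant_id all_plants all_branches plant_energies) := by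
  unfold Pre_calculate_plant_energy; infer_instance

def pvWitness_calculate_plant_energy : Int × (List (Int × Int)) × (List (Int × List (Int × Int))) × (List (Int × Int)) :=
  (1, [(1, 5)], [(1, [])], [])

def Spec_calculate_plant_energy (plant_id : Int) (all_plants : List (Int × Int)) (all_branches : List (Int × List (Int × Int))) (plant_energies : List (Int × Int)) (out : Int) : Prop := out = calculate_plant_energy_alt plant_id all_plants all_branches plant_energies
instance (plant_id : Int) (all_plants : List (Int × Int)) (all_branches : List (Int × List (Int × Int))) (plant_energies : List (Int × Int)) (out : Int) : Decidable (Spec_calculate_plant_energy plant_id all_plants all_branches plant_energies out) := by unfold Spec_calculate_plant_energy; infer_instance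

-- ===== CLAIM (what is proved, stated in full; the proofs are below) =====
def Claim_equal_calculate_plant_energy : Prop := ∀ (plant_id : Int) (all_plants : List (Int × Int)) (all_branches : List (Int × List (Int × Int))) (plant_energies : List (Int × Int)), Dom_calculate_plant_energy plant_id all_plants all_branches plant_energies → Pre_calculate_plant_energy plant_id all_plants all_branches plant_energies → Spec_calculate_plant_energy plant_id all_plants all_branches plant_energies (calculate_plant_energy plant_id all_plants all_branches plant_energies)

-- ===== LEMMAS AND PROOFS =====

-- The value semantics both programs compute: PVal P C0 L k v ⟺ "v is the energy of plant k"
-- (relative to the plants dict P, the branch dict L and the cache C0 at entry).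
mutual
inductive PVal (P C0 : PySem.Dict Int Int) (L : PySem.Dict Int (List (Int × Int))) : Int → Int → Prop where
  | cached : ∀ {k v}, C0.get? k = some v → PVal P C0 L k v
  | node : ∀ {k bs t s}, C0.get? k = none → L.get? k = some bs → P.get? k = some t →
      PValL P C0 L bs s → PVal P C0 L k (if s < t then 0 else s)
inductive PValL (P C0 : PySem.Dict Int Int) (L : PySem.Dict Int (List (Int × Int))) : List (Int × Int) → Int → Prop where
  | nil : PValL P C0 L [] 0
  | cons : ∀ {o th rest v s}, PVal P C0 L o v → PValL P C0 L rest s → PValL P C0 L ((o, th) :: rest) (v * th + s)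
end

theorem pval_det (P C0 : PySem.Dict Int Int) (L : PySem.Dict Int (List (Int × Int)))
    {k v} (h : PVal P C0 L k v) : ∀ w, PVal P C0 L k w → v = w := by
  refine PVal.rec (P := P) (C0 := C0) (L := L)
    (motive_1 := fun k v _ => ∀ w, PVal P C0 L k w → v = w)
    (motive_2 := fun bs s _ => ∀ w, PValL P C0 L bs w → s = w)
    ?_ ?_ ?_ ?_ h
  · intro k v hc w hw
    cases hw with
    | cached hc' => rw [hc] at hc'; exact Option.some_inj.mp hc'
    | node hn _ _ _ => rw [hc] at hn; cases hn
  · intro k bs t s hn hl hp hbs ih w hw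
    cases hw with
    | cached hc => rw [hn] at hc; cases hc
    | node hn' hl' hp' hbs' =>
      rw [hl] at hl'; injection hl' with e; subst e
      rw [hp] at hp'; injection hp' with e; subst e
      rw [ih _ hbs']
  · intro w hw; cases hw; rfl
  · intro o th rest v s hv hs ihv ihs w hw
    cases hw with
    | cons hv' hs' => rw [ihv _ hv', ihs _ hs']

-- a cache is good if it extends C0 and every entry is semantically correct
def pvGood (P C0 : PySem.Dict Int Int) (L : PySem.Dict Int (List (Int × Int)))
    (c : PySem.Dict Int Int) : Prop :=
  (∀ k v, C0.get? k = some v → c.get? k = some v) ∧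
  (∀ k v, c.get? k = some v → PVal P C0 L k v)

def pvExt (c c' : PySem.Dict Int Int) : Prop := ∀ k, ((c.get? k).isSome = true) → ((c'.get? k).isSome = true)

def pvCov (S0 : List Int) (c : PySem.Dict Int Int) : Prop := ∀ k ∈ S0, (c.get? k).isSome = true

-- inserting a correct value for an uncached key preserves goodness
theorem pvGood_insert (P C0 : PySem.Dict Int Int) (L : PySem.Dict Int (List (Int × Int)))
    (c : PySem.Dict Int Int) (hg : pvGood P C0 L c) {pid : Int} (hC0 : C0.get? pid = none)
    {v : Int} (hv : PVal P C0 L pid v) : pvGood P C0 L (c.insert pid v) := by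
  constructor
  · intro k u hk
    by_cases hkp : k = pid
    · subst hkp; rw [hC0] at hk; cases hk
    · rw [PySem.Dict.get?_insert_of_ne _ _ hkp]; exact hg.1 k u hk
  · intro k u hk
    rw [PySem.Dict.get?_insert] at hk
    split at hk
    · rename_i he; subst he; injection hk with e; subst e; exact hv
    · exact hg.2 k u hk

-- ---- soundness of A ----
theorem pvA_fold_sound (ap : List (Int × Int)) (ab : List (Int × List (Int × Int)))
    (C0 : PySem.Dict Int Int) (fuel : Nat)
    (hnode : ∀ pid c v c', pvGood (PySem.Dict.mk ap) C0 (PySem.Dict.mk ab) c →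
      pvA_node ap ab fuel pid c = some (v, c') →
      pvGood (PySem.Dict.mk ap) C0 (PySem.Dict.mk ab) c' ∧ PVal (PySem.Dict.mk ap) C0 (PySem.Dict.mk ab) pid v) :
    ∀ bs acc c r c', pvGood (PySem.Dict.mk ap) C0 (PySem.Dict.mk ab) c →
      pvA_fold ap ab fuel bs acc c = some (r, c') →
      pvGood (PySem.Dict.mk ap) C0 (PySem.Dict.mk ab) c' ∧
      ∃ s, PValL (PySem.Dict.mk ap) C0 (PySem.Dict.mk ab) bs s ∧ r = acc + s := by
  intro bs
  induction bs with
  | nil =>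
    intro acc c r c' hg h
    rw [pvA_fold] at h
    obtain ⟨h1, h2⟩ := Prod.mk.injEq .. ▸ Option.some_inj.mp h
    subst h1; subst h2
    exact ⟨hg, 0, PValL.nil, by omega⟩
  | cons hd tl ih =>
    obtain ⟨o, th⟩ := hd
    intro acc c r c' hg h
    rw [pvA_fold] at h
    cases he : pvA_node ap ab fuel o c with
    | none => simp only [he] at h; simp at h
    | some vc =>
      obtain ⟨v, c1⟩ := vc
      simp only [he] at h
      obtain ⟨hg1, hv⟩ := hnode o c v c1 hg he
      obtain ⟨hg', s, hs, hr⟩ := ih (acc + v * th) c1 r c' hg1 h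
      exact ⟨hg', v * th + s, PValL.cons hv hs, by omega⟩

theorem pvA_node_sound (ap : List (Int × Int)) (ab : List (Int × List (Int × Int)))
    (C0 : PySem.Dict Int Int) :
    ∀ (fuel : Nat) pid c v c', pvGood (PySem.Dict.mk ap) C0 (PySem.Dict.mk ab) c →
      pvA_node ap ab fuel pid c = some (v, c') →
      pvGood (PySem.Dict.mk ap) C0 (PySem.Dict.mk ab) c' ∧ PVal (PySem.Dict.mk ap) C0 (PySem.Dict.mk ab) pid v := by
  intro fuel
  induction fuel with
  | zero => intro pid c v c' hg h; rw [pvA_node] at h; cases h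
  | succ f ih =>
    intro pid c v c' hg h
    rw [pvA_node] at h
    cases hc : c.get? pid with
    | some w =>
      simp only [hc, Option.some.injEq, Prod.mk.injEq] at h
      obtain ⟨h1, h2⟩ := h
      subst h1; subst h2
      exact ⟨hg, hg.2 pid _ hc⟩
    | none =>
      simp only [hc] at h
      cases hl : (PySem.Dict.mk ab).get? pid with
      | none => simp only [hl] at h; simp at h
      | some bs =>
        simp only [hl] at h
        cases hf : pvA_fold ap ab f bs 0 c with
        | none => simp only [hf] at h; simp at h
        | some pc =>
          obtain ⟨pe, c1⟩ := pc
          simp only [hf] at h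
          cases hp : (PySem.Dict.mk ap).get? pid with
          | none => simp only [hp] at h; simp at h
          | some t =>
            simp only [hp, Option.some.injEq, Prod.mk.injEq] at h
            obtain ⟨h1, h2⟩ := h
            obtain ⟨hg1, s, hs, hr⟩ := pvA_fold_sound ap ab C0 f ih bs 0 c pe c1 hg hf
            have hC0 : C0.get? pid = none := by
              cases hx : C0.get? pid with
              | none => rfl
              | some u => have := hg.1 pid u hx; rw [hc] at this; cases this
            have hval : PVal (PySem.Dict.mk ap) C0 (PySem.Dict.mk ab) pid (if pe < t then 0 else pe) := by
              have hpe : pe = s := by omega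
              rw [hpe]
              exact PVal.node hC0 hl hp hs
            subst h1; subst h2
            exact ⟨pvGood_insert _ _ _ _ hg1 hC0 hval, hval⟩

-- ---- monotonicity of A's cache ----
theorem pvA_fold_ext (ap : List (Int × Int)) (ab : List (Int × List (Int × Int))) (fuel : Nat)
    (hnode : ∀ pid c v c', pvA_node ap ab fuel pid c = some (v, c') → pvExt c c') :
    ∀ bs acc c r c', pvA_fold ap ab fuel bs acc c = some (r, c') → pvExt c c' := by
  intro bs
  induction bs with
  | nil =>
    intro acc c r c' h
    rw [pvA_fold] at h
    obtain ⟨h1, h2⟩ := Prod.mk.injEq .. ▸ Option.some_inj.mp h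
    subst h2
    exact fun k hk => hk
  | cons hd tl ih =>
    obtain ⟨o, th⟩ := hd
    intro acc c r c' h
    rw [pvA_fold] at h
    cases he : pvA_node ap ab fuel o c with
    | none => simp only [he] at h; simp at h
    | some vc =>
      obtain ⟨v, c1⟩ := vc
      simp only [he] at h
      exact fun k hk => ih (acc + v * th) c1 r c' h k (hnode o c v c1 he k hk)

theorem pvA_node_ext (ap : List (Int × Int)) (ab : List (Int × List (Int × Int))) :
    ∀ (fuel : Nat) pid c v c', pvA_node ap ab fuel pid c = some (v, c') → pvExt c c' := by
  intro fuel
  induction fuel with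
  | zero => intro pid c v c' h; rw [pvA_node] at h; cases h
  | succ f ih =>
    intro pid c v c' h
    rw [pvA_node] at h
    cases hc : c.get? pid with
    | some w =>
      simp only [hc, Option.some.injEq, Prod.mk.injEq] at h
      obtain ⟨h1, h2⟩ := h
      subst h2
      exact fun k hk => hk
    | none =>
      simp only [hc] at h
      cases hl : (PySem.Dict.mk ab).get? pid with
      | none => simp only [hl] at h; simp at h
      | some bs =>
        simp only [hl] at h
        cases hf : pvA_fold ap ab f bs 0 c with
        | none => simp only [hf] at h; simp at h
        | some pc =>
          obtain ⟨pe, c1⟩ := pc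
          simp only [hf] at h
          cases hp : (PySem.Dict.mk ap).get? pid with
          | none => simp only [hp] at h; simp at h
          | some t =>
            simp only [hp, Option.some.injEq, Prod.mk.injEq] at h
            obtain ⟨h1, h2⟩ := h
            subst h2
            intro k hk
            rw [PySem.Dict.get?_insert]
            split
            · simp
            · exact pvA_fold_ext ap ab f ih bs 0 c pe c1 hf k hk

-- ---- completeness of A on pvReach ----
theorem pvA_fold_complete (ap : List (Int × Int)) (ab : List (Int × List (Int × Int)))
    (S0 : List Int) (r fuel : Nat)
    (hnode : ∀ pid c, pid ∈ pvReach ap ab S0 r → pvCov S0 c → (pvA_node ap ab fuel pid c).isSome = true) :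
    ∀ bs acc c, (∀ b ∈ bs, b.1 ∈ pvReach ap ab S0 r) → pvCov S0 c →
      (pvA_fold ap ab fuel bs acc c).isSome = true := by
  intro bs
  induction bs with
  | nil =>
    intro acc c _ _
    rw [pvA_fold]
    rfl
  | cons hd tl ih =>
    obtain ⟨o, th⟩ := hd
    intro acc c hb hcov
    obtain ⟨vc, he⟩ := Option.isSome_iff_exists.mp (hnode o c (hb (o, th) (by simp)) hcov)
    obtain ⟨v, c1⟩ := vc
    rw [pvA_fold]
    simp only [he]
    exact ih (acc + v * th) c1 (fun b hbm => hb b (by simp [hbm]))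
      (fun k hk => pvA_node_ext ap ab fuel o c v c1 he k (hcov k hk))

theorem pvA_node_complete (ap : List (Int × Int)) (ab : List (Int × List (Int × Int)))
    (S0 : List Int) (hnd : (ab.map Prod.fst).Nodup) :
    ∀ (r : Nat) (fuel : Nat) pid c, pid ∈ pvReach ap ab S0 r → r < fuel → pvCov S0 c →
      (pvA_node ap ab fuel pid c).isSome = true := by
  intro r
  induction r with
  | zero =>
    intro fuel pid c hmem hlt hcov
    cases fuel with
    | zero => omega
    | succ f =>
      rw [pvA_node]
      obtain ⟨v, hv⟩ := Option.isSome_iff_exists.mp (hcov pid hmem)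
      simp only [hv]
      rfl
  | succ r ih =>
    intro fuel pid c hmem hlt hcov
    simp only [pvReach] at hmem
    rcases List.mem_append.mp hmem with h1 | h2
    · exact ih fuel pid c h1 (by omega) hcov
    · obtain ⟨kb, hkb, hif⟩ := List.mem_filterMap.mp h2
      have hcond : (!(pvReach ap ab S0 r).contains kb.1 &&
          (ap.any (fun p => p.1 == kb.1)) && kb.2.all (fun b => (pvReach ap ab S0 r).contains b.1)) = true := by
        by_contra hx
        rw [if_neg hx] at hif; cases hif
      rw [if_pos hcond] at hif
      injection hif with hif
      subst hif
      simp only [Bool.and_eq_true, Bool.not_eq_true'] at hcond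
      obtain ⟨⟨hnc, hany⟩, hall⟩ := hcond
      cases fuel with
      | zero => omega
      | succ f =>
        rw [pvA_node]
        cases hc : c.get? kb.1 with
        | some v => rfl
        | none =>
          have hl : (PySem.Dict.mk ab).get? kb.1 = some kb.2 :=
            PySem.Dict.get?_of_mem_items (d := PySem.Dict.mk ab) (by simpa using hkb) hnd
          simp only [hl]
          have hfold := pvA_fold_complete ap ab S0 r f
            (fun pid' c' hm hcv => ih f pid' c' hm (by omega) hcv) kb.2 0 c
            (by intro b hbm
                have := List.all_eq_true.mp hall b hbm
                simpa using this) hcov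
          obtain ⟨pc, hf⟩ := Option.isSome_iff_exists.mp hfold
          obtain ⟨pe, c1⟩ := pc
          simp only [hf]
          cases hp : (PySem.Dict.mk ap).get? kb.1 with
          | none =>
            exfalso
            obtain ⟨p, hpm, hpe⟩ := List.any_eq_true.mp hany
            have : kb.1 ∈ (PySem.Dict.mk ap).keys := by
              show kb.1 ∈ ap.map Prod.fst
              exact List.mem_map.mpr ⟨p, hpm, by simpa using hpe⟩
            exact (PySem.Dict.get?_eq_none_iff_not_mem_keys _ _).mp hp this
          | some t => rfl

-- ---- soundness of B ----
theorem pvB_sum_sound (P C0 : PySem.Dict Int Int) (L : PySem.Dict Int (List (Int × Int)))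
    (c : PySem.Dict Int Int) (hc : ∀ k v, c.get? k = some v → PVal P C0 L k v) :
    ∀ bs acc r, pvB_sum c bs acc = some r → ∃ s, PValL P C0 L bs s ∧ r = acc + s := by
  intro bs
  induction bs with
  | nil =>
    intro acc r h
    rw [pvB_sum] at h
    injection h with h; subst h
    exact ⟨0, PValL.nil, by omega⟩
  | cons hd tl ih =>
    obtain ⟨o, th⟩ := hd
    intro acc r h
    rw [pvB_sum] at h
    cases he : c.get? o with
    | none => simp only [he] at h; simp at h
    | some v =>
      simp only [he] at h
      obtain ⟨s, hs, hr⟩ := ih (acc + v * th) r h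
      exact ⟨v * th + s, PValL.cons (hc o v he) hs, by omega⟩

theorem pvB_step_good (ap : List (Int × Int)) (ab : List (Int × List (Int × Int)))
    (C0 : PySem.Dict Int Int) (hnd : (ab.map Prod.fst).Nodup)
    (kb : Int × List (Int × Int)) (hkb : kb ∈ ab) (c : PySem.Dict Int Int)
    (hg : pvGood (PySem.Dict.mk ap) C0 (PySem.Dict.mk ab) c) :
    pvGood (PySem.Dict.mk ap) C0 (PySem.Dict.mk ab) (pvB_step (PySem.Dict.mk ap) c kb) := by
  rw [pvB_step]
  split
  · exact hg
  · rename_i hcont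
    cases hp : (PySem.Dict.mk ap).get? kb.1 with
    | none => exact hg
    | some t =>
      cases hsum : pvB_sum c kb.2 0 with
      | none => exact hg
      | some total =>
        simp only
        have hcnone : c.get? kb.1 = none := by
          rw [Bool.not_eq_true, PySem.Dict.contains_eq_isSome_get?] at hcont
          exact Option.not_isSome_iff_eq_none.mp (by simp [hcont])
        have hC0 : C0.get? kb.1 = none := by
          cases hx : C0.get? kb.1 with
          | none => rfl
          | some u => have := hg.1 kb.1 u hx; rw [hcnone] at this; cases this
        have hl : (PySem.Dict.mk ab).get? kb.1 = some kb.2 :=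
          PySem.Dict.get?_of_mem_items (d := PySem.Dict.mk ab) (by simpa using hkb) hnd
        obtain ⟨s, hs, hr⟩ := pvB_sum_sound _ _ _ c hg.2 kb.2 0 total hsum
        refine pvGood_insert _ _ _ _ hg hC0 ?_
        have hts : total = s := by omega
        rw [hts]
        exact PVal.node hC0 hl hp hs

theorem pvB_foldl_good (ap : List (Int × Int)) (ab : List (Int × List (Int × Int)))
    (C0 : PySem.Dict Int Int) (hnd : (ab.map Prod.fst).Nodup) :
    ∀ (l : List (Int × List (Int × Int))) c, (∀ kb ∈ l, kb ∈ ab) →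
      pvGood (PySem.Dict.mk ap) C0 (PySem.Dict.mk ab) c →
      pvGood (PySem.Dict.mk ap) C0 (PySem.Dict.mk ab) (l.foldl (pvB_step (PySem.Dict.mk ap)) c) := by
  intro l
  induction l with
  | nil => intro c _ hg; exact hg
  | cons hd tl ih =>
    intro c hsub hg
    rw [List.foldl_cons]
    exact ih _ (fun kb hk => hsub kb (by simp [hk]))
      (pvB_step_good ap ab C0 hnd hd (hsub hd (by simp)) c hg)

theorem pvB_loop_good (ap : List (Int × Int)) (ab : List (Int × List (Int × Int)))
    (C0 : PySem.Dict Int Int) (hnd : (ab.map Prod.fst).Nodup) (pid : Int) :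
    ∀ (n : Nat) c, pvGood (PySem.Dict.mk ap) C0 (PySem.Dict.mk ab) c →
      pvGood (PySem.Dict.mk ap) C0 (PySem.Dict.mk ab) (pvB_loop pid (PySem.Dict.mk ap) ab n c) := by
  intro n
  induction n with
  | zero => intro c hg; exact hg
  | succ m ih =>
    intro c hg
    rw [pvB_loop]
    split
    · exact hg
    · exact ih _ (pvB_foldl_good ap ab C0 hnd ab c (fun kb hk => hk) hg)

-- ---- completeness of B on pvReach ----
theorem pvB_step_ext (P c : PySem.Dict Int Int) (kb : Int × List (Int × Int)) :
    pvExt c (pvB_step P c kb) := by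
  rw [pvB_step]
  split
  · exact fun k hk => hk
  · cases hp : P.get? kb.1 with
    | none => exact fun k hk => hk
    | some t =>
      cases hsum : pvB_sum c kb.2 0 with
      | none => exact fun k hk => hk
      | some total =>
        intro k hk
        simp only
        rw [PySem.Dict.get?_insert]
        split
        · rfl
        · exact hk

theorem pvB_foldl_ext (P : PySem.Dict Int Int) :
    ∀ (l : List (Int × List (Int × Int))) c, pvExt c (l.foldl (pvB_step P) c) := by
  intro l
  induction l with
  | nil => exact fun c k hk => hk
  | cons hd tl ih =>
    intro c k hk
    rw [List.foldl_cons]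
    exact ih (pvB_step P c hd) k (pvB_step_ext P c hd k hk)

theorem pvB_sum_complete (c : PySem.Dict Int Int) :
    ∀ bs acc, (∀ b ∈ bs, ((c.get? b.1).isSome = true)) → (pvB_sum c bs acc).isSome = true := by
  intro bs
  induction bs with
  | nil =>
    intro acc _
    rw [pvB_sum]
    rfl
  | cons hd tl ih =>
    obtain ⟨o, th⟩ := hd
    intro acc hb
    obtain ⟨v, hv⟩ := Option.isSome_iff_exists.mp (hb (o, th) (by simp))
    rw [pvB_sum]
    simp only [hv]
    exact ih (acc + v * th) (fun b hbm => hb b (by simp [hbm]))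

theorem pvB_fold_reach (P : PySem.Dict Int Int) (kb : Int × List (Int × Int))
    (hp : (P.get? kb.1).isSome = true) :
    ∀ (l : List (Int × List (Int × Int))) c, kb ∈ l → (∀ b ∈ kb.2, ((c.get? b.1).isSome = true)) →
      (((l.foldl (pvB_step P) c).get? kb.1).isSome = true) := by
  intro l
  induction l with
  | nil => intro c h; cases h
  | cons hd tl ih =>
    intro c hmem hb
    rw [List.foldl_cons]
    rcases List.mem_cons.mp hmem with h1 | h2
    · subst h1
      have hstep : (((pvB_step P c kb).get? kb.1).isSome = true) := by
        rw [pvB_step]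
        split
        · rename_i hcont; rw [← PySem.Dict.contains_eq_isSome_get?]; exact hcont
        · obtain ⟨t, ht⟩ := Option.isSome_iff_exists.mp hp
          simp only [ht]
          obtain ⟨total, htot⟩ := Option.isSome_iff_exists.mp (pvB_sum_complete c kb.2 0 hb)
          simp only [htot]
          rw [PySem.Dict.get?_insert_self]
          rfl
      exact pvB_foldl_ext P tl (pvB_step P c kb) kb.1 hstep
    · exact ih (pvB_step P c hd) h2
        (fun b hbm => pvB_step_ext P c hd b.1 (hb b hbm))

theorem pvB_round_cover (ap : List (Int × Int)) (ab : List (Int × List (Int × Int))) (S0 : List Int) (j : Nat)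
    (c : PySem.Dict Int Int) (h : ∀ k ∈ pvReach ap ab S0 j, ((c.get? k).isSome = true)) :
    ∀ k ∈ pvReach ap ab S0 (j + 1), (((pvB_round (PySem.Dict.mk ap) ab c).get? k).isSome = true) := by
  intro k hk
  simp only [pvReach] at hk
  rcases List.mem_append.mp hk with h1 | h2
  · exact pvB_foldl_ext _ ab c k (h k h1)
  · obtain ⟨kb, hkb, hif⟩ := List.mem_filterMap.mp h2
    have hcond : (!(pvReach ap ab S0 j).contains kb.1 &&
        (ap.any (fun p => p.1 == kb.1)) && kb.2.all (fun b => (pvReach ap ab S0 j).contains b.1)) = true := by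
      by_contra hx
      rw [if_neg hx] at hif; cases hif
    rw [if_pos hcond] at hif
    injection hif with hif
    subst hif
    simp only [Bool.and_eq_true, Bool.not_eq_true'] at hcond
    obtain ⟨⟨hnc, hany⟩, hall⟩ := hcond
    have hp : ((PySem.Dict.mk ap).get? kb.1).isSome = true := by
      cases hx : (PySem.Dict.mk ap).get? kb.1 with
      | none =>
        exfalso
        obtain ⟨p, hpm, hpe⟩ := List.any_eq_true.mp hany
        have : kb.1 ∈ (PySem.Dict.mk ap).keys := by
          show kb.1 ∈ ap.map Prod.fst
          exact List.mem_map.mpr ⟨p, hpm, by simpa using hpe⟩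
        exact (PySem.Dict.get?_eq_none_iff_not_mem_keys _ _).mp hx this
      | some t => rfl
    exact pvB_fold_reach _ kb hp ab c hkb
      (by intro b hbm
          have := List.all_eq_true.mp hall b hbm
          exact h b.1 (by simpa using this))

theorem pvB_loop_cover (ap : List (Int × Int)) (ab : List (Int × List (Int × Int))) (S0 : List Int) (pid : Int) :
    ∀ (m j : Nat) c, pid ∈ pvReach ap ab S0 (j + m) →
      (∀ k ∈ pvReach ap ab S0 j, ((c.get? k).isSome = true)) →
      (((pvB_loop pid (PySem.Dict.mk ap) ab m c).get? pid).isSome = true) := by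
  intro m
  induction m with
  | zero => intro j c hmem h; exact h pid hmem
  | succ m ih =>
    intro j c hmem h
    rw [pvB_loop]
    split
    · rename_i hcont; rw [← PySem.Dict.contains_eq_isSome_get?]; exact hcont
    · have hmem' : pid ∈ pvReach ap ab S0 ((j + 1) + m) := by
        have he : j + (m + 1) = (j + 1) + m := by omega
        rw [he] at hmem; exact hmem
      exact ih (j + 1) (pvB_round (PySem.Dict.mk ap) ab c) hmem'
        (pvB_round_cover ap ab S0 j c h)

-- ===== VERDICT (by name: the statement is the Claim_ definition above) =====
theorem calculate_plant_energy_spec : Claim_equal_calculate_plant_energy := by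
  intro plant_id all_plants all_branches plant_energies _ hpre
  obtain ⟨hndp, hndb, hndc, hreach⟩ := hpre
  unfold Spec_calculate_plant_energy
  have hcov0 : pvCov (plant_energies.map Prod.fst) (PySem.Dict.mk plant_energies) := by
    intro k hk
    cases hx : (PySem.Dict.mk plant_energies).get? k with
    | some v => rfl
    | none =>
      exact absurd ((PySem.Dict.get?_eq_none_iff_not_mem_keys _ _).mp hx) (by simpa using hk)
  have hgood0 : pvGood (PySem.Dict.mk all_plants) (PySem.Dict.mk plant_energies)
      (PySem.Dict.mk all_branches) (PySem.Dict.mk plant_energies) :=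
    ⟨fun k v h => h, fun k v h => PVal.cached h⟩
  have hA := pvA_node_complete all_plants all_branches (plant_energies.map Prod.fst) hndb
    all_branches.length (all_branches.length + 1) plant_id (PySem.Dict.mk plant_energies)
    hreach (by omega) hcov0
  obtain ⟨vc, hAeq⟩ := Option.isSome_iff_exists.mp hA
  obtain ⟨v, cA⟩ := vc
  obtain ⟨_, hvalA⟩ := pvA_node_sound all_plants all_branches (PySem.Dict.mk plant_energies)
    (all_branches.length + 1) plant_id (PySem.Dict.mk plant_energies) v cA hgood0 hAeq
  have hB := pvB_loop_cover all_plants all_branches (plant_energies.map Prod.fst) plant_id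
    all_branches.length 0 (PySem.Dict.mk plant_energies) (by simpa using hreach) hcov0
  obtain ⟨w, hBeq⟩ := Option.isSome_iff_exists.mp hB
  have hgoodB := pvB_loop_good all_plants all_branches (PySem.Dict.mk plant_energies) hndb
    plant_id all_branches.length (PySem.Dict.mk plant_energies) hgood0
  have hvalB := hgoodB.2 plant_id w hBeq
  have hvw : v = w := pval_det _ _ _ hvalA w hvalB
  unfold calculate_plant_energy calculate_plant_energy_alt
  rw [hAeq, hBeq, hvw]
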